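-- pv_equiv track=rewrite | github.com/harry123180/adaptive_control | Python/NCKU/pytorch_autoencoder_2000rpm_ub0_hsn.py | list3dto2d
-- ===== SOURCE A (Python) =====
-- def list3dto2d(list_3d):
--     points=[]
--     x=[]
--     y=[]
--     z=[]
--     for list_2d in list_3d:
--         for point in list_2d:
--             points.append(point)
--             x.append(point[0])
--             y.append(point[1])
--             z.append(point[2])
--     return points,x,y,z
-- ===== SOURCE B (Python) =====
-- def list3dto2d(list_3d):
--     points = []
--     for list_2d in list_3d:
--         points.extend(list_2d)
--     if not points:
--         return points, [], [], []
--     x, y, z, *_ = map(list, zip(*points))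
--     return points, x, y, z
-- ===== Notes on version B (the rewrite author's own statement) =====
-- stated objective: alternative
-- what changed: A extracts each coordinate inside one interleaved nested loop with four per-point appends; B first flattens with extend, then obtains all three coordinate lists at once by transposing the flattened points with zip(*points) and unpacking the first three columns.
import Mathlib
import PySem

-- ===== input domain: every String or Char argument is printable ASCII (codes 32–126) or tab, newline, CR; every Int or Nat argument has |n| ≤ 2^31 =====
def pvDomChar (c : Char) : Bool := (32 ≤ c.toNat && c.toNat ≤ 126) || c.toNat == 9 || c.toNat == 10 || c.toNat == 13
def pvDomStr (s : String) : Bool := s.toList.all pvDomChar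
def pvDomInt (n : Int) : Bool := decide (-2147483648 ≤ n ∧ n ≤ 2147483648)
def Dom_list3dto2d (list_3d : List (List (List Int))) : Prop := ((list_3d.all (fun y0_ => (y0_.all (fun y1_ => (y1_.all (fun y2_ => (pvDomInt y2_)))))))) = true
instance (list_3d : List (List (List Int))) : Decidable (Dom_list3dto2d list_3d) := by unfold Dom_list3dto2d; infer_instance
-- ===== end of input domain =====

-- B flattens first with extend, then gets all three coordinate lists in one transpose (zip(*points)) instead of A's interleaved loop with four appends per point.


-- ===== PORT A =====
-- point[i] ported as (pyGet? point i).getD 0; the none (IndexError) case is excluded by Pre_.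
def list3dto2d (list_3d : List (List (List Int))) : List (List Int) × List Int × List Int × List Int :=
  list_3d.foldl (fun acc list_2d =>
    list_2d.foldl (fun acc point =>
      (acc.1 ++ [point],
       acc.2.1 ++ [(PySem.List.pyGet? point 0).getD 0],
       acc.2.2.1 ++ [(PySem.List.pyGet? point 1).getD 0],
       acc.2.2.2 ++ [(PySem.List.pyGet? point 2).getD 0])) acc)
    (([] : List (List Int)), ([] : List Int), ([] : List Int), ([] : List Int))

-- ===== PORT B =====
-- Python's n-ary zip(*rows): one column per index until the shortest row runs out.
def pyZipStar (rows : List (List Int)) : List (List Int) :=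
  if h : rows = [] ∨ rows.any (fun q => q.isEmpty) = true then []
  else (rows.map (fun q => q.headD 0)) :: pyZipStar (rows.map List.tail)
termination_by (rows.headD []).length
decreasing_by
  simp only [not_or] at h
  obtain ⟨h1, h2⟩ := h
  cases rows with
  | nil => exact absurd rfl h1
  | cons r rest =>
    simp only [List.any_eq_true, not_exists, not_and] at h2
    cases r with
    | nil => simp at h2
    | cons a t => simp

-- the 'x, y, z, *_ = map(list, zip(*points))' unpack: cols.getD i [] is column i; with Pre_ there are ≥ 3 columns (where Python would raise ValueError, outside Pre_, getD returns []).
def list3dto2d_alt (list_3d : List (List (List Int))) : List (List Int) × List Int × List Int × List Int :=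
  let points := list_3d.foldl (fun acc list_2d => acc ++ list_2d) []
  if points = [] then (points, [], [], [])
  else
    let cols := pyZipStar points
    (points, cols.getD 0 [], cols.getD 1 [], cols.getD 2 [])

-- ===== PRECONDITION & SPEC =====
-- Pre_ excludes inputs containing a point with fewer than 3 coordinates, on which Python A raises IndexError (and B raises ValueError).
def Pre_list3dto2d (list_3d : List (List (List Int))) : Prop :=
  ∀ sub ∈ list_3d, ∀ p ∈ sub, 3 ≤ p.length
instance (list_3d : List (List (List Int))) : Decidable (Pre_list3dto2d list_3d) := by unfold Pre_list3dto2d; infer_instance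
def pvWitness_list3dto2d : List (List (List Int)) := [[[1, 2, 3], [4, 5, 6]], [], [[7, 8, 9]]]
def Spec_list3dto2d (list_3d : List (List (List Int))) (out : List (List Int) × List Int × List Int × List Int) : Prop := out = list3dto2d_alt list_3d
instance (list_3d : List (List (List Int))) (out : List (List Int) × List Int × List Int × List Int) : Decidable (Spec_list3dto2d list_3d out) := by unfold Spec_list3dto2d; infer_instance

-- ===== CLAIM (what is proved, stated in full; the proofs are below) =====
def Claim_equal_list3dto2d : Prop := ∀ (list_3d : List (List (List Int))), Dom_list3dto2d list_3d → Pre_list3dto2d list_3d → Spec_list3dto2d list_3d (list3dto2d list_3d)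

-- ===== LEMMAS AND PROOFS =====
theorem list3dto2d_inner (l : List (List Int)) (a : List (List Int)) (b c d : List Int) :
    l.foldl (fun acc point =>
      (acc.1 ++ [point],
       acc.2.1 ++ [(PySem.List.pyGet? point 0).getD 0],
       acc.2.2.1 ++ [(PySem.List.pyGet? point 1).getD 0],
       acc.2.2.2 ++ [(PySem.List.pyGet? point 2).getD 0])) (a, b, c, d)
    = (a ++ l,
       b ++ l.map (fun p => (PySem.List.pyGet? p 0).getD 0),
       c ++ l.map (fun p => (PySem.List.pyGet? p 1).getD 0),
       d ++ l.map (fun p => (PySem.List.pyGet? p 2).getD 0)) := by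
  induction l generalizing a b c d with
  | nil => simp
  | cons h t ih => simp [List.foldl_cons, ih]

theorem list3dto2d_outer (L : List (List (List Int))) (a : List (List Int)) (b c d : List Int) :
    L.foldl (fun acc list_2d =>
      list_2d.foldl (fun acc point =>
        (acc.1 ++ [point],
         acc.2.1 ++ [(PySem.List.pyGet? point 0).getD 0],
         acc.2.2.1 ++ [(PySem.List.pyGet? point 1).getD 0],
         acc.2.2.2 ++ [(PySem.List.pyGet? point 2).getD 0])) acc) (a, b, c, d)
    = (a ++ L.flatMap id,
       b ++ (L.flatMap id).map (fun p => (PySem.List.pyGet? p 0).getD 0),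
       c ++ (L.flatMap id).map (fun p => (PySem.List.pyGet? p 1).getD 0),
       d ++ (L.flatMap id).map (fun p => (PySem.List.pyGet? p 2).getD 0)) := by
  induction L generalizing a b c d with
  | nil => simp
  | cons h t ih => simp [List.foldl_cons, list3dto2d_inner, ih, List.append_assoc]

-- column i of the transpose is the list of i-th entries, whenever every row is long enough
theorem pyZipStar_col (i : Nat) : ∀ (rows : List (List Int)), rows ≠ [] →
    (∀ r ∈ rows, i < r.length) →
    (pyZipStar rows).getD i [] = rows.map (fun p => p.getD i 0) := by
  induction i with
  | zero =>
    intro rows hne hlen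
    rw [pyZipStar]
    have hno : ¬ (rows = [] ∨ rows.any (fun q => q.isEmpty) = true) := by
      simp only [not_or, List.any_eq_true, not_exists, not_and]
      refine ⟨hne, fun r hr => ?_⟩
      have := hlen r hr
      cases r with
      | nil => simp at this
      | cons a t => simp
    rw [dif_neg hno]
    simp only [List.getD_cons_zero]
    apply List.map_congr_left
    intro r hr
    have := hlen r hr
    cases r with
    | nil => simp at this
    | cons a t => simp
  | succ i ih =>
    intro rows hne hlen
    rw [pyZipStar]
    have hno : ¬ (rows = [] ∨ rows.any (fun q => q.isEmpty) = true) := by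
      simp only [not_or, List.any_eq_true, not_exists, not_and]
      refine ⟨hne, fun r hr => ?_⟩
      have := hlen r hr
      cases r with
      | nil => simp at this
      | cons a t => simp
    rw [dif_neg hno]
    simp only [List.getD_cons_succ]
    rw [ih]
    · rw [List.map_map]
      apply List.map_congr_left
      intro r hr
      have := hlen r hr
      cases r with
      | nil => simp at this
      | cons a t => simp
    · simp [hne]
    · intro r hr
      simp only [List.mem_map] at hr
      obtain ⟨q, hq, rfl⟩ := hr
      have := hlen q hq
      cases q with
      | nil => simp at this
      | cons a t => simpa using this

-- ===== VERDICT (by name: the statement is the Claim_ definition above) =====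
theorem list3dto2d_spec : Claim_equal_list3dto2d := by
  intro L _ hpre
  show list3dto2d L = list3dto2d_alt L
  have hmem : ∀ p ∈ L.flatMap id, 3 ≤ p.length := by
    intro p hp
    simp only [List.mem_flatMap, id] at hp
    obtain ⟨sub, hs, hps⟩ := hp
    exact hpre sub hs p hps
  unfold list3dto2d list3dto2d_alt
  rw [list3dto2d_outer]
  simp only [PySem.List.foldl_append_eq_flatten, List.nil_append, List.flatMap_id] at *
  by_cases hnil : L.flatten = []
  · simp [hnil]
  · rw [if_neg hnil]
    have col : ∀ i : Nat, i < 3 →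
        (pyZipStar L.flatten).getD i [] = L.flatten.map (fun p => p.getD i 0) := by
      intro i hi
      exact pyZipStar_col i _ hnil (fun r hr => lt_of_lt_of_le hi (hmem r hr))
    rw [col 0 (by omega), col 1 (by omega), col 2 (by omega)]
    refine congrArg _ (congrArg₂ _ ?_ (congrArg₂ _ ?_ ?_)) <;>
    · apply List.map_congr_left
      intro p hp
      have h3 := hmem p hp
      match p, h3 with
      | a :: b :: c :: t, _ =>
        simp only [PySem.List.pyGet?, PySem.List.pyIdx?]
        split_ifs with hif
        · simp_all
        all_goals omega
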